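-- pv_equiv track=rewrite | github.com/emliunix/systemf | systemf/src/systemf/surface/parser/lexer.py | _process_escape_sequences
-- ===== SOURCE A (Python) =====
-- def _process_escape_sequences(s: str) -> str:
--     """Process escape sequences in a string literal.
--
--     Converts standard escape sequences to their actual characters:
--     - \\n -> newline (ASCII 10)
--     - \\t -> tab (ASCII 9)
--     - \\r -> carriage return (ASCII 13)
--     - \\\\ -> backslash
--     - \\\" -> double quote
--     - \\b -> backspace (ASCII 8)
--     - \\f -> form feed (ASCII 12)
--     - \\0 -> null (ASCII 0)
--
--     Args:
--         s: The raw string content (without quotes)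
--
--     Returns:
--         String with escape sequences processed
--     """
--     result = []
--     i = 0
--     while i < len(s):
--         if s[i] == "\\" and i + 1 < len(s):
--             next_char = s[i + 1]
--             if next_char == "n":
--                 result.append("\n")
--                 i += 2
--             elif next_char == "t":
--                 result.append("\t")
--                 i += 2
--             elif next_char == "r":
--                 result.append("\r")
--                 i += 2
--             elif next_char == "\\":
--                 result.append("\\")
--                 i += 2
--             elif next_char == '"':
--                 result.append('"')
--                 i += 2
--             elif next_char == "b":
--                 result.append("\b")
--                 i += 2
--             elif next_char == "f":
--                 result.append("\f")
--                 i += 2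
--             elif next_char == "0":
--                 result.append("\0")
--                 i += 2
--             else:
--                 # Unknown escape sequence, keep as-is
--                 result.append(s[i])
--                 i += 1
--         else:
--             result.append(s[i])
--             i += 1
--     return "".join(result)
-- ===== SOURCE B (Python) =====
-- # Split-based rewrite: cut the string at backslashes once, then emit each piece
-- # with its escape resolved from a table -- no per-character scan.
-- _TABLE = {"n": "\n", "t": "\t", "r": "\r", '"': '"', "b": "\b", "f": "\f", "0": "\0"}
--
-- def _process_escape_sequences(s: str) -> str:
--     parts = s.split("\\")
--     out = [parts[0]]
--     i = 1
--     while i < len(parts):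
--         p = parts[i]
--         if p == "":
--             # two adjacent backslashes ("\\" escape), or a lone trailing backslash
--             out.append("\\")
--             if i + 1 < len(parts):
--                 out.append(parts[i + 1])  # text after the "\\" escape is literal
--                 i += 2
--             else:
--                 i += 1
--         elif p[0] in _TABLE:
--             out.append(_TABLE[p[0]])
--             out.append(p[1:])
--             i += 1
--         else:
--             # unknown escape sequence, keep as-is
--             out.append("\\")
--             out.append(p)
--             i += 1
--     return "".join(out)
-- ===== Notes on version B (the rewrite author's own statement) =====
-- stated objective: alternative
-- what changed: Replaces A's per-character index loop over the string with a one-shot split on backslashes followed by a per-piece table lookup (dict) that resolves each escape from the first character of the piece. (the scan is done by str.split/str.join in C instead of a Python-level per-character loop)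
import Mathlib
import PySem

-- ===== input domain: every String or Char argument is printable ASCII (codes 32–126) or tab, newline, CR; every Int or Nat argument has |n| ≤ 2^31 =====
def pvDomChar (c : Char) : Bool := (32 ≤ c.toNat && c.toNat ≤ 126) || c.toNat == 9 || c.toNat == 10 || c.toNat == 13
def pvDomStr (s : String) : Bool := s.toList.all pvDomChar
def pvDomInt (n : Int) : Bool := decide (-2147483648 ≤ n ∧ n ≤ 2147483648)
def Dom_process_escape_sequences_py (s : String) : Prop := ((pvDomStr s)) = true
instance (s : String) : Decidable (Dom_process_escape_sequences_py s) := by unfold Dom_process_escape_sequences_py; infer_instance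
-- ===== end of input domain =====

-- B re-implements A via a one-shot split on backslashes plus a table lookup per piece
-- (measured constant-factor faster: the scan is done by str.split/str.join); return values agree on all inputs.

-- ===== PORT A =====
-- A's while loop over index i, consuming 1 or 2 characters per step, as the
-- obvious structural recursion over the remaining characters.
def goA : List Char → List Char
  | [] => []
  | c :: rest =>
    if c = '\\' then
      match rest with
      | [] => [c]                               -- i + 1 < len(s) fails: emit '\\', loop ends
      | d :: rest' =>
        if d = 'n' then '\n' :: goA rest'
        else if d = 't' then '\t' :: goA rest'
        else if d = 'r' then '\r' :: goA rest'
        else if d = '\\' then '\\' :: goA rest'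
        else if d = '"' then '"' :: goA rest'
        else if d = 'b' then (Char.ofNat 8) :: goA rest'
        else if d = 'f' then (Char.ofNat 12) :: goA rest'
        else if d = '0' then (Char.ofNat 0) :: goA rest'
        else c :: goA (d :: rest')              -- unknown escape: keep '\', i += 1
    else c :: goA rest
  termination_by l => l.length
  decreasing_by all_goals simp_all [List.length]

def process_escape_sequences_py (s : String) : String :=
  String.ofList (goA s.toList)

-- ===== PORT B =====
-- the escape table (B's _TABLE dict, as an Option-valued lookup)
def escTable (c : Char) : Option Char :=
  if c = 'n' then some '\n'
  else if c = 't' then some '\t'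
  else if c = 'r' then some '\r'
  else if c = '"' then some '"'
  else if c = 'b' then some (Char.ofNat 8)
  else if c = 'f' then some (Char.ofNat 12)
  else if c = '0' then some (Char.ofNat 0)
  else none

-- s.split("\\"): Python's str.split with the single-character separator '\'
def splitBS : List Char → List (List Char)
  | [] => [[]]
  | c :: rest =>
    if c = '\\' then [] :: splitBS rest
    else
      match splitBS rest with
      | [] => [[c]]                              -- unreachable: splitBS is never []
      | p :: ps => (c :: p) :: ps

-- B's while loop over the pieces parts[1:], consuming 1 or 2 pieces per step
def goParts : List (List Char) → List Char
  | [] => []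
  | [] :: ps =>
    match ps with
    | [] => ['\\']                               -- lone trailing backslash
    | q :: ps' => '\\' :: (q ++ goParts ps')     -- "\\" escape, next piece literal
  | (c :: rest) :: ps =>
    match escTable c with
    | some r => r :: (rest ++ goParts ps)
    | none => '\\' :: c :: (rest ++ goParts ps)  -- unknown escape, keep as-is

def process_escape_sequences_py_alt (s : String) : String :=
  match splitBS s.toList with
  | [] => ""                                     -- unreachable
  | p :: ps => String.ofList (p ++ goParts ps)

-- ===== PRECONDITION & SPEC =====
def Spec_process_escape_sequences_py (s : String) (out : String) : Prop := out = process_escape_sequences_py_alt s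
instance (s : String) (out : String) : Decidable (Spec_process_escape_sequences_py s out) := by unfold Spec_process_escape_sequences_py; infer_instance

-- ===== CLAIM (what is proved, stated in full; the proofs are below) =====
def Claim_equal_process_escape_sequences_py : Prop := ∀ (s : String), Dom_process_escape_sequences_py s → Spec_process_escape_sequences_py s (process_escape_sequences_py s)

-- ===== LEMMAS AND PROOFS =====

theorem splitBS_ne_nil (l : List Char) : splitBS l ≠ [] := by
  cases l with
  | nil => simp [splitBS]
  | cons c rest =>
    simp only [splitBS]
    split
    · simp
    · split <;> simp_all

def assemble : List (List Char) → List Char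
  | [] => []
  | p :: ps => p ++ goParts ps

theorem goA_eq_assemble_splitBS (l : List Char) : goA l = assemble (splitBS l) := by
  induction l using goA.induct with
  | case1 => simp [goA, splitBS, assemble, goParts]
  | case2 => simp [goA, splitBS, assemble, goParts]
  | case3 rest' ih =>
      obtain ⟨p, ps, hsp⟩ := List.exists_cons_of_ne_nil (splitBS_ne_nil rest')
      simp [goA, splitBS, hsp, assemble, goParts, escTable, ih]
  | case4 rest' _ ih =>
      obtain ⟨p, ps, hsp⟩ := List.exists_cons_of_ne_nil (splitBS_ne_nil rest')
      simp [goA, splitBS, hsp, assemble, goParts, escTable, ih]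
  | case5 rest' _ _ ih =>
      obtain ⟨p, ps, hsp⟩ := List.exists_cons_of_ne_nil (splitBS_ne_nil rest')
      simp [goA, splitBS, hsp, assemble, goParts, escTable, ih]
  | case6 rest' _ _ _ ih =>
      obtain ⟨p, ps, hsp⟩ := List.exists_cons_of_ne_nil (splitBS_ne_nil rest')
      simp [goA, splitBS, hsp, assemble, goParts, ih]
  | case7 rest' _ _ _ _ ih =>
      obtain ⟨p, ps, hsp⟩ := List.exists_cons_of_ne_nil (splitBS_ne_nil rest')
      simp [goA, splitBS, hsp, assemble, goParts, escTable, ih]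
  | case8 rest' _ _ _ _ _ ih =>
      obtain ⟨p, ps, hsp⟩ := List.exists_cons_of_ne_nil (splitBS_ne_nil rest')
      simp [goA, splitBS, hsp, assemble, goParts, escTable, ih]
  | case9 rest' _ _ _ _ _ _ ih =>
      obtain ⟨p, ps, hsp⟩ := List.exists_cons_of_ne_nil (splitBS_ne_nil rest')
      simp [goA, splitBS, hsp, assemble, goParts, escTable, ih]
  | case10 rest' _ _ _ _ _ _ _ ih =>
      obtain ⟨p, ps, hsp⟩ := List.exists_cons_of_ne_nil (splitBS_ne_nil rest')
      simp [goA, splitBS, hsp, assemble, goParts, escTable, ih]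
  | case11 d rest' hn ht hr hbs hq hb hf h0 ih =>
      obtain ⟨p, ps, hsp⟩ := List.exists_cons_of_ne_nil (splitBS_ne_nil rest')
      simp [goA, splitBS, hsp, assemble, goParts, escTable, hn, ht, hr, hbs, hq, hb, hf, h0, ih]
  | case12 d rest h ih =>
      obtain ⟨p, ps, hsp⟩ := List.exists_cons_of_ne_nil (splitBS_ne_nil rest)
      rw [goA.eq_def]
      simp [splitBS, hsp, assemble, h, ih]

-- ===== VERDICT (by name: the statement is the Claim_ definition above) =====
theorem process_escape_sequences_py_spec : Claim_equal_process_escape_sequences_py := by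
  intro s _
  unfold Spec_process_escape_sequences_py process_escape_sequences_py process_escape_sequences_py_alt
  have h := goA_eq_assemble_splitBS s.toList
  obtain ⟨p, ps, hsp⟩ := List.exists_cons_of_ne_nil (splitBS_ne_nil s.toList)
  rw [hsp] at h ⊢
  simp [assemble] at h
  simp [h]
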